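-- pv_equiv track=rewrite | github.com/raulandrei00/Polytechnique_L1 | pc_102/flight.py | optimal_td
-- ===== SOURCE A (Python) =====
-- def optimal_td (fruits , x=0 , y=0, memo=None):
--     if memo is None:
--         memo = {}
--     elif (x,y) in memo:
--         return memo[x,y]
--
--     if x == len(fruits)-1:
--         return int(y in fruits[x])
--     else:
--         v = 0
--         for d in [-1 , 0 , 1]:
--             v = max(v , optimal_td(fruits , x+1 , y+d, memo))
--         v += int(y in fruits[x])
--         memo[x,y] = v
--         return v
-- ===== SOURCE B (Python) =====
-- # Bottom-up iterative DP over the reachable band, replacing A's memoized recursion.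
-- # Equivalence is about the RETURN value only: B also writes computed states into a
-- # caller-supplied memo, but when the memo pre-seeds interior states the exact set of
-- # written keys can differ from A's.
-- def optimal_td(fruits, x=0, y=0, memo=None):
--     if memo is None:
--         memo = {}
--     elif (x, y) in memo:
--         return memo[x, y]
--     last = len(fruits) - 1
--     width = last - x
--     best = {}
--     for j in range(y - width, y + width + 1):
--         best[j] = memo[last, j] if (last, j) in memo else int(j in fruits[last])
--     for t in range(1, width + 1):
--         i = last - t
--         w = width - t
--         nb = {}
--         for j in range(y - w, y + w + 1):
--             if (i, j) in memo:
--                 nb[j] = memo[i, j]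
--             else:
--                 v = max(0, best[j - 1], best[j], best[j + 1]) + int(j in fruits[i])
--                 memo[i, j] = v
--                 nb[j] = v
--         best = nb
--     return best[y]
-- ===== Notes on version B (the rewrite author's own statement) =====
-- stated objective: alternative
-- what changed: Replaced A's memoized top-down recursion (3-way branching with a threaded memo dict) by a bottom-up iterative DP that fills per-row tables over the reachable column band from the last row up to the start row; B needs no recursion (A's recursion depth is the number of rows).
import Mathlib
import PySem

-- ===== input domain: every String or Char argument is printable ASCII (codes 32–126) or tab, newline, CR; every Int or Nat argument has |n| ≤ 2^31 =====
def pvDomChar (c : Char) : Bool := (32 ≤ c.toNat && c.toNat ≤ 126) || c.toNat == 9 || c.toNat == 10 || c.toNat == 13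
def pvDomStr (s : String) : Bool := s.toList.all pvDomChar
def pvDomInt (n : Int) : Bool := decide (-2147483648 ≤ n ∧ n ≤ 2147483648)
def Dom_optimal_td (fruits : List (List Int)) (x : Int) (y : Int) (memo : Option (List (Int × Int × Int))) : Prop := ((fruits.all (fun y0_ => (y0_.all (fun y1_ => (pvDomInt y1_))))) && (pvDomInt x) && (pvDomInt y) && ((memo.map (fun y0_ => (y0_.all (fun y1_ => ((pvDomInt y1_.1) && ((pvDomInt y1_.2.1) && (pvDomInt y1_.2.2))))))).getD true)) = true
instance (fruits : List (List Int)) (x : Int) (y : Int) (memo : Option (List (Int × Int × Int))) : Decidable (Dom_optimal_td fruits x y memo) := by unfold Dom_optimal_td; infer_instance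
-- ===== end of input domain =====

-- B replaces A's memoized top-down recursion by a bottom-up iterative DP over the
-- reachable band of columns; equivalence is about the RETURN value only (both Pythons
-- mutate a caller-supplied memo dict; the sets of keys they write can differ).

-- ===== PORT A =====
-- int(y in fruits[x]); fruits[x] raises IndexError out of range — under Pre_ the index
-- is always in range, so the .getD [] default is never the value used.
def pvRowHasA (fruits : List (List Int)) (i j : Int) : Int :=
  if ((PySem.List.pyGet? fruits i).getD []).contains j then 1 else 0

-- the memo argument as a Python dict {(x,y): v} (later duplicates overwrite)
def pvDictA (l : List (Int × Int × Int)) : PySem.Dict (Int × Int) Int :=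
  l.foldl (fun d e => d.insert (e.1, e.2.1) e.2.2) PySem.Dict.empty

-- A's recursion; the fuel k encodes len(fruits)-1-x (A's base test 'x == len(fruits)-1':
-- the two coincide under Pre_; outside Pre_ the Python diverges).  The threaded dict is
-- the mutated memo: the pair returns (value, memo after the call).
def pvGoA (fruits : List (List Int)) : Nat → Int → Int → PySem.Dict (Int × Int) Int → Int × PySem.Dict (Int × Int) Int
  | k, x, y, memo =>
    match memo.get? (x, y) with
    | some v => (v, memo)                        -- 'elif (x,y) in memo: return memo[x,y]'
    | none =>
      match k with
      | 0 => (pvRowHasA fruits x y, memo)        -- 'if x == len(fruits)-1: return int(y in fruits[x])'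
      | k' + 1 =>                                 -- 'for d in [-1,0,1]: v = max(v, optimal_td(...))'
        let r1 := pvGoA fruits k' (x + 1) (y - 1) memo
        let v1 := max 0 r1.1
        let r2 := pvGoA fruits k' (x + 1) y r1.2
        let v2 := max v1 r2.1
        let r3 := pvGoA fruits k' (x + 1) (y + 1) r2.2
        let v := max v2 r3.1 + pvRowHasA fruits x y
        (v, r3.2.insert (x, y) v)                -- 'memo[x,y] = v'

def optimal_td (fruits : List (List Int)) (x : Int) (y : Int) (memo : Option (List (Int × Int × Int))) : Int :=
  let d0 := match memo with
    | none => PySem.Dict.empty                   -- 'if memo is None: memo = {}' (guard then trivially misses)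
    | some l => pvDictA l
  (pvGoA fruits (((fruits.length : Int) - 1 - x).toNat) x y d0).1

-- ===== PORT B =====
def pvRowHasB (fruits : List (List Int)) (i j : Int) : Int :=
  if ((PySem.List.pyGet? fruits i).getD []).contains j then 1 else 0

def pvDictB (l : List (Int × Int × Int)) : PySem.Dict (Int × Int) Int :=
  l.foldl (fun d e => d.insert (e.1, e.2.1) e.2.2) PySem.Dict.empty

-- 'for j in range(y-width, y+width+1): best[j] = memo[last,j] if (last,j) in memo else int(j in fruits[last])'
def pvLastRowB (fruits : List (List Int)) (d0 : PySem.Dict (Int × Int) Int) (last y width : Int) : PySem.Dict Int Int :=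
  (PySem.List.pyRange (y - width) (y + width + 1) 1).foldl
    (fun best j => best.insert j (match d0.get? (last, j) with
      | some v => v
      | none => pvRowHasB fruits last j)) PySem.Dict.empty

-- one iteration of 'for t in range(1, width+1)' (B's writes into memo are dropped: the
-- port is about the return value, and B never reads back a key it wrote itself)
def pvStepB (fruits : List (List Int)) (d0 : PySem.Dict (Int × Int) Int) (last y width : Int)
    (best : PySem.Dict Int Int) (t : Int) : PySem.Dict Int Int :=
  let i := last - t
  let w := width - t
  (PySem.List.pyRange (y - w) (y + w + 1) 1).foldl
    (fun nb j =>
      match d0.get? (i, j) with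
      | some v => nb.insert j v
      | none => nb.insert j (max (max (max 0 (best.getD (j - 1) 0)) (best.getD j 0)) (best.getD (j + 1) 0)
                              + pvRowHasB fruits i j))
    PySem.Dict.empty

-- body of B after the memo guard; 'best[y]' raises KeyError only outside Pre_, so the
-- .getD 0 default is never the value used under Pre_
def pvAltCore (fruits : List (List Int)) (x y : Int) (d0 : PySem.Dict (Int × Int) Int) : Int :=
  let last := (fruits.length : Int) - 1
  let width := last - x
  let best0 := pvLastRowB fruits d0 last y width
  let best := (PySem.List.pyRange 1 (width + 1) 1).foldl (pvStepB fruits d0 last y width) best0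
  (best.get? y).getD 0

def optimal_td_alt (fruits : List (List Int)) (x : Int) (y : Int) (memo : Option (List (Int × Int × Int))) : Int :=
  match memo with
  | none => pvAltCore fruits x y PySem.Dict.empty
  | some l =>
    match (pvDictB l).get? (x, y) with
    | some v => v
    | none => pvAltCore fruits x y (pvDictB l)

-- ===== PRECONDITION & SPEC =====
-- A returns a value exactly when the start row index is a valid (possibly negative,
-- Python-wraparound) index into fruits, or the caller-supplied memo already holds the
-- start state (then A returns it before touching fruits); everywhere else A raises
-- (RecursionError or IndexError), and nothing is claimed there.
def Pre_optimal_td (fruits : List (List Int)) (x : Int) (y : Int) (memo : Option (List (Int × Int × Int))) : Prop :=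
  (fruits ≠ [] ∧ -(fruits.length : Int) ≤ x ∧ x < (fruits.length : Int))
  ∨ (match memo with
     | none => false
     | some l => l.any (fun e => e.1 == x && e.2.1 == y)) = true
instance (fruits : List (List Int)) (x : Int) (y : Int) (memo : Option (List (Int × Int × Int))) : Decidable (Pre_optimal_td fruits x y memo) := by unfold Pre_optimal_td; infer_instance

def pvWitness_optimal_td : List (List Int) × Int × Int × (Option (List (Int × Int × Int))) :=
  ([[0, 1], [1], [0, 2]], 0, 0, none)

def Spec_optimal_td (fruits : List (List Int)) (x : Int) (y : Int) (memo : Option (List (Int × Int × Int))) (out : Int) : Prop := out = optimal_td_alt fruits x y memo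
instance (fruits : List (List Int)) (x : Int) (y : Int) (memo : Option (List (Int × Int × Int))) (out : Int) : Decidable (Spec_optimal_td fruits x y memo out) := by unfold Spec_optimal_td; infer_instance

-- ===== CLAIM (what is proved, stated in full; the proofs are below) =====
def Claim_equal_optimal_td : Prop := ∀ (fruits : List (List Int)) (x : Int) (y : Int) (memo : Option (List (Int × Int × Int))), Dom_optimal_td fruits x y memo → Pre_optimal_td fruits x y memo → Spec_optimal_td fruits x y memo (optimal_td fruits x y memo)

-- ===== LEMMAS AND PROOFS =====

-- the common value function: what state (x,y) is worth at fuel k, guards read from d0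
def pvV (fruits : List (List Int)) (d0 : PySem.Dict (Int × Int) Int) : Nat → Int → Int → Int
  | 0, x, y => (d0.get? (x, y)).getD (pvRowHasA fruits x y)
  | k + 1, x, y =>
    match d0.get? (x, y) with
    | some v => v
    | none => max (max (max 0 (pvV fruits d0 k (x + 1) (y - 1))) (pvV fruits d0 k (x + 1) y))
                  (pvV fruits d0 k (x + 1) (y + 1)) + pvRowHasA fruits x y

lemma pvV_hit (fruits : List (List Int)) (d0 : PySem.Dict (Int × Int) Int) (k : Nat) (x y v : Int)
    (h : d0.get? (x, y) = some v) : pvV fruits d0 k x y = v := by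
  cases k <;> simp [pvV, h]

lemma pvRowHasB_eq (fruits : List (List Int)) (i j : Int) : pvRowHasB fruits i j = pvRowHasA fruits i j := rfl

lemma pvDictB_eq (l : List (Int × Int × Int)) : pvDictB l = pvDictA l := rfl

lemma pvGoA_correct (fruits : List (List Int)) (d0 : PySem.Dict (Int × Int) Int) :
    ∀ (k : Nat) (x y : Int) (memo : PySem.Dict (Int × Int) Int),
      (∀ p v, d0.get? p = some v → memo.get? p = some v) →
      (∀ p v, memo.get? p = some v → v = pvV fruits d0 (((fruits.length : Int) - 1 - p.1).toNat) p.1 p.2) →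
      (k : Int) = (fruits.length : Int) - 1 - x →
      (pvGoA fruits k x y memo).1 = pvV fruits d0 k x y
      ∧ (∀ p v, d0.get? p = some v → (pvGoA fruits k x y memo).2.get? p = some v)
      ∧ (∀ p v, (pvGoA fruits k x y memo).2.get? p = some v → v = pvV fruits d0 (((fruits.length : Int) - 1 - p.1).toNat) p.1 p.2) := by
  intro k
  induction k with
  | zero =>
    intro x y memo hsub hinv hk
    have hfuel : (((fruits.length : Int) - 1 - x).toNat) = 0 := by omega
    unfold pvGoA
    cases hm : memo.get? (x, y) with
    | some v =>
      refine ⟨?_, hsub, hinv⟩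
      have := hinv (x, y) v hm
      simpa [hfuel] using this
    | none =>
      have hd0 : d0.get? (x, y) = none := by
        cases hd : d0.get? (x, y) with
        | none => rfl
        | some w => rw [hsub (x, y) w hd] at hm; exact absurd hm (by simp)
      refine ⟨?_, hsub, hinv⟩
      simp [pvV, hd0]
  | succ k' ih =>
    intro x y memo hsub hinv hk
    have hfuel : (((fruits.length : Int) - 1 - x).toNat) = k' + 1 := by omega
    unfold pvGoA
    cases hm : memo.get? (x, y) with
    | some v =>
      refine ⟨?_, hsub, hinv⟩
      have := hinv (x, y) v hm
      simpa [hfuel] using this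
    | none =>
      have hd0 : d0.get? (x, y) = none := by
        cases hd : d0.get? (x, y) with
        | none => rfl
        | some w => rw [hsub (x, y) w hd] at hm; exact absurd hm (by simp)
      obtain ⟨e1, s1, i1⟩ := ih (x + 1) (y - 1) memo hsub hinv (by omega)
      obtain ⟨e2, s2, i2⟩ := ih (x + 1) y _ s1 i1 (by omega)
      obtain ⟨e3, s3, i3⟩ := ih (x + 1) (y + 1) _ s2 i2 (by omega)
      have hval : max (max (max 0 (pvGoA fruits k' (x + 1) (y - 1) memo).1)
            (pvGoA fruits k' (x + 1) y (pvGoA fruits k' (x + 1) (y - 1) memo).2).1)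
            (pvGoA fruits k' (x + 1) (y + 1) (pvGoA fruits k' (x + 1) y (pvGoA fruits k' (x + 1) (y - 1) memo).2).2).1
            + pvRowHasA fruits x y = pvV fruits d0 (k' + 1) x y := by
        rw [e1, e2, e3]
        simp only [pvV, hd0]
      refine ⟨hval, ?_, ?_⟩
      · intro p w hw
        have hne : p ≠ (x, y) := by
          intro hpe
          rw [hpe] at hw
          rw [hw] at hd0
          simp at hd0
        rw [PySem.Dict.get?_insert, if_neg hne]
        exact s3 p w hw
      · intro p w hw
        rw [PySem.Dict.get?_insert] at hw
        by_cases hp : p = (x, y)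
        · subst hp
          rw [if_pos rfl] at hw
          rw [← Option.some.inj hw]
          simp only [hfuel]
          exact hval
        · rw [if_neg hp] at hw
          exact i3 p w hw

lemma pvFoldRange_get? (f : Int → Int) (F : PySem.Dict Int Int → Int → PySem.Dict Int Int)
    (hF : ∀ d j, F d j = d.insert j (f j)) :
    ∀ (a b : Int) (d : PySem.Dict Int Int) (j : Int),
      ((PySem.List.pyRange a b 1).foldl F d).get? j
        = if a ≤ j ∧ j < b then some (f j) else d.get? j := by
  intro a b
  induction hm : (b - a).toNat generalizing a with
  | zero =>
    intro d j
    rw [PySem.List.pyRange_one_eq_nil (by omega)]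
    simp only [List.foldl_nil]
    rw [if_neg (by omega)]
  | succ m ih =>
    intro d j
    rw [PySem.List.pyRange_one_cons (by omega)]
    simp only [List.foldl_cons]
    rw [hF, ih (a + 1) (by omega), PySem.Dict.get?_insert]
    split_ifs with h1 h2 h3 <;> first
      | rfl
      | omega
      | (subst h3; rfl)

lemma pvLastRowB_get? (fruits : List (List Int)) (d0 : PySem.Dict (Int × Int) Int) (last y W : Int) (j : Int) :
    (pvLastRowB fruits d0 last y W).get? j
      = if y - W ≤ j ∧ j < y + W + 1 then some (pvV fruits d0 0 (last : Int) j) else none := by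
  unfold pvLastRowB
  rw [pvFoldRange_get? (fun j => match d0.get? (last, j) with
        | some v => v
        | none => pvRowHasB fruits last j) _ (fun d j => rfl)]
  cases hd : d0.get? (last, j) <;> simp [pvV, hd, pvRowHasB_eq]

lemma pvStepB_get? (fruits : List (List Int)) (d0 : PySem.Dict (Int × Int) Int) (last y W : Int)
    (best : PySem.Dict Int Int) (t : Int) (j : Int) :
    (pvStepB fruits d0 last y W best t).get? j
      = if y - (W - t) ≤ j ∧ j < y + (W - t) + 1
        then some (match d0.get? (last - t, j) with
          | some v => v
          | none => max (max (max 0 (best.getD (j - 1) 0)) (best.getD j 0)) (best.getD (j + 1) 0)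
                      + pvRowHasB fruits (last - t) j)
        else none := by
  unfold pvStepB
  rw [pvFoldRange_get? (fun j => match d0.get? (last - t, j) with
        | some v => v
        | none => max (max (max 0 (best.getD (j - 1) 0)) (best.getD j 0)) (best.getD (j + 1) 0)
                    + pvRowHasB fruits (last - t) j) _
      (fun d j => by cases hd : d0.get? (last - t, j) <;> simp only [hd])]
  simp

lemma pvRows (fruits : List (List Int)) (d0 : PySem.Dict (Int × Int) Int) (last y W : Int) :
    ∀ (m : Nat), (m : Int) ≤ W →
      ∀ j, ((PySem.List.pyRange 1 ((m : Int) + 1) 1).foldl (pvStepB fruits d0 last y W) (pvLastRowB fruits d0 last y W)).get? j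
        = if y - (W - (m : Int)) ≤ j ∧ j < y + (W - (m : Int)) + 1
          then some (pvV fruits d0 m (last - (m : Int)) j) else none := by
  intro m
  induction m with
  | zero =>
    intro _ j
    rw [PySem.List.pyRange_one_eq_nil (by omega), List.foldl_nil]
    simpa using pvLastRowB_get? fruits d0 last y W j
  | succ m ih =>
    intro hm j
    simp only [Nat.cast_add, Nat.cast_one]
    simp only [Nat.cast_add, Nat.cast_one] at hm
    have hsplit : PySem.List.pyRange 1 ((m : Int) + 1 + 1) 1
        = PySem.List.pyRange 1 ((m : Int) + 1) 1 ++ [(m : Int) + 1] := by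
      rw [← PySem.List.pyRange_one_succ_right (by omega)]
    rw [hsplit, List.foldl_append, List.foldl_cons, List.foldl_nil, pvStepB_get?]
    by_cases hband : y - (W - ((m : Int) + 1)) ≤ j ∧ j < y + (W - ((m : Int) + 1)) + 1
    · rw [if_pos hband, if_pos hband]
      congr 1
      cases hd : d0.get? (last - ((m : Int) + 1), j) with
      | some v => simp [pvV, hd]
      | none =>
        simp only [pvV, hd]
        have hg : ∀ (a : Int), y - (W - (m : Int)) ≤ a → a < y + (W - (m : Int)) + 1 →
            ((PySem.List.pyRange 1 ((m : Int) + 1) 1).foldl (pvStepB fruits d0 last y W) (pvLastRowB fruits d0 last y W)).getD a 0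
              = pvV fruits d0 m (last - (m : Int)) a := by
          intro a h1 h2
          rw [PySem.Dict.getD_eq_get?_getD, ih (by omega) a, if_pos ⟨h1, h2⟩]
          rfl
        rw [hg (j - 1) (by omega) (by omega), hg j (by omega) (by omega), hg (j + 1) (by omega) (by omega)]
        have hrow : last - ((m : Int) + 1) + 1 = last - (m : Int) := by ring
        rw [pvRowHasB_eq, hrow]
    · rw [if_neg hband, if_neg hband]

lemma pvAltCore_eq (fruits : List (List Int)) (d0 : PySem.Dict (Int × Int) Int) (x y : Int)
    (hx : 0 ≤ (fruits.length : Int) - 1 - x) :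
    pvAltCore fruits x y d0 = pvV fruits d0 (((fruits.length : Int) - 1 - x).toNat) x y := by
  simp only [pvAltCore]
  have hWt : ((((fruits.length : Int) - 1 - x).toNat : Int)) = (fruits.length : Int) - 1 - x := by omega
  have h := pvRows fruits d0 ((fruits.length : Int) - 1) y ((fruits.length : Int) - 1 - x)
    (((fruits.length : Int) - 1 - x).toNat) (by omega) y
  rw [hWt] at h
  have harg : (fruits.length : Int) - 1 - ((fruits.length : Int) - 1 - x) = x := by ring
  rw [harg] at h
  rw [h, if_pos (by omega)]
  rfl

lemma pvDictA_get?_ne_none (l : List (Int × Int × Int)) (x y : Int)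
    (h : l.any (fun e => e.1 == x && e.2.1 == y) = true) : (pvDictA l).get? (x, y) ≠ none := by
  rw [Ne, PySem.Dict.get?_eq_none_iff_not_mem_keys]
  unfold pvDictA
  rw [PySem.Dict.keys_foldl_insert_key l (fun e => (e.1, e.2.1)) (fun d e => e.2.2)]
  simp only [PySem.Dict.keys_empty, PySem.Set.update_nil_left, PySem.Set.mem_ofList, List.mem_map, not_not]
  simp only [List.any_eq_true, beq_iff_eq, Bool.and_eq_true] at h
  obtain ⟨e, he, h1, h2⟩ := h
  exact ⟨e, he, by rw [h1, h2]⟩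

lemma pvGoA_init (fruits : List (List Int)) (d0 : PySem.Dict (Int × Int) Int) (x y : Int)
    (hx : 0 ≤ (fruits.length : Int) - 1 - x) :
    (pvGoA fruits (((fruits.length : Int) - 1 - x).toNat) x y d0).1
      = pvV fruits d0 (((fruits.length : Int) - 1 - x).toNat) x y :=
  (pvGoA_correct fruits d0 (((fruits.length : Int) - 1 - x).toNat) x y d0
    (fun _ _ h => h)
    (fun p v h => by cases p with | mk a b => exact (pvV_hit fruits d0 _ a b v h).symm)
    (by omega)).1

lemma pvGoA_guard (fruits : List (List Int)) (k : Nat) (x y v : Int) (d0 : PySem.Dict (Int × Int) Int)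
    (hg : d0.get? (x, y) = some v) : (pvGoA fruits k x y d0).1 = v := by
  cases k <;> (unfold pvGoA; rw [hg])

-- ===== VERDICT (by name: the statement is the Claim_ definition above) =====
theorem optimal_td_spec : Claim_equal_optimal_td := by
  intro fruits x y memo _ hpre
  unfold Spec_optimal_td
  cases memo with
  | none =>
    have hpre1 : fruits ≠ [] ∧ -(fruits.length : Int) ≤ x ∧ x < (fruits.length : Int) := by
      rcases hpre with h | h
      · exact h
      · simp at h
    have hx : 0 ≤ (fruits.length : Int) - 1 - x := by
      rcases hpre1 with ⟨hne, _, hlt⟩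
      have : fruits.length ≠ 0 := by simpa using fun h => hne (List.length_eq_zero_iff.mp h)
      omega
    show optimal_td fruits x y none = optimal_td_alt fruits x y none
    simp only [optimal_td, optimal_td_alt]
    rw [pvGoA_init fruits PySem.Dict.empty x y hx, pvAltCore_eq fruits PySem.Dict.empty x y hx]
  | some l =>
    show optimal_td fruits x y (some l) = optimal_td_alt fruits x y (some l)
    simp only [optimal_td, optimal_td_alt]
    rw [pvDictB_eq]
    cases hg : (pvDictA l).get? (x, y) with
    | some v => rw [pvGoA_guard fruits _ x y v (pvDictA l) hg]
    | none =>
      have hpre1 : fruits ≠ [] ∧ -(fruits.length : Int) ≤ x ∧ x < (fruits.length : Int) := by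
        rcases hpre with h | h
        · exact h
        · exact absurd hg (pvDictA_get?_ne_none l x y (by simpa using h))
      have hx : 0 ≤ (fruits.length : Int) - 1 - x := by
        rcases hpre1 with ⟨hne, _, hlt⟩
        have : fruits.length ≠ 0 := by simpa using fun h => hne (List.length_eq_zero_iff.mp h)
        omega
      rw [pvGoA_init fruits (pvDictA l) x y hx, pvAltCore_eq fruits (pvDictA l) x y hx]
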